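-- pv_equiv track=rewrite | github.com/Cdguzmanr/Cdguzmanr-TP1-Carlos-Samuel- | TP1_Carlos_Samuel.py | procesarCodTel
-- ===== SOURCE A (Python) =====
-- def procesarCodTel(pfrase):
--     """
--     Funcionamiento: Codifica y decodifica una frase con el método de Palabra inversa
--     Entradas: pfrase (str) frase a trabajar
--     Salidas: Resultado del proceso
--     """
--     resultado=""
--     n2,n3,n4,n5,n6,n7,n8,n9 = ["a","b","c"],["d","e","f"],["g","h","i"],["j","k","l"],["m","n","o"],["p","q","r","s"],["t","u","v"],["w","x","y","z"]
--     for letra in pfrase: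
--         if letra in n2:  # Si la letra se encuentra en la lista referente al "botón telefónico", concatena su valor correspondiente
--             resultado+=f"2{n2.index(letra)+1}"
--         elif letra in n3:
--             resultado+=f"3{n3.index(letra)+1}"
--         elif letra in n4:
--             resultado+=f"4{n4.index(letra)+1}"
--         elif letra in n5:
--             resultado+=f"5{n5.index(letra)+1}"
--         elif letra in n6:
--             resultado+=f"6{n6.index(letra)+1}"
--         elif letra in n7:
--             resultado+=f"7{n7.index(letra)+1}"
--         elif letra in n8:
--             resultado+=f"8{n8.index(letra)+1}"
--         elif letra in n9:
--             resultado+=f"9{n9.index(letra)+1}"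
--         else:
--             resultado+="*"
--         resultado+=" "
--     return f"Mensaje codificado: {resultado}"
-- ===== SOURCE B (Python) =====
-- def procesarCodTel(pfrase):
--     piezas = ["Mensaje codificado: "]
--     for letra in pfrase:
--         k = ord(letra) - ord('a')
--         if 0 <= k < 15:
--             piezas.append(f"{2 + k // 3}{k % 3 + 1} ")
--         elif 15 <= k < 19:
--             piezas.append(f"7{k - 14} ")
--         elif 19 <= k < 22:
--             piezas.append(f"8{k - 18} ")
--         elif 22 <= k < 26:
--             piezas.append(f"9{k - 21} ")
--         else:
--             piezas.append("* ")
--     return "".join(piezas)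
-- ===== Notes on version B (the rewrite author's own statement) =====
-- stated objective: alternative
-- what changed: B computes each code arithmetically from the character's alphabet offset (button and position by floor division and small range offsets, no letter lists, no table, no scans), collecting pieces in a list joined once, instead of A's eight membership tests with .index scans and string concatenation.
import Mathlib
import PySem

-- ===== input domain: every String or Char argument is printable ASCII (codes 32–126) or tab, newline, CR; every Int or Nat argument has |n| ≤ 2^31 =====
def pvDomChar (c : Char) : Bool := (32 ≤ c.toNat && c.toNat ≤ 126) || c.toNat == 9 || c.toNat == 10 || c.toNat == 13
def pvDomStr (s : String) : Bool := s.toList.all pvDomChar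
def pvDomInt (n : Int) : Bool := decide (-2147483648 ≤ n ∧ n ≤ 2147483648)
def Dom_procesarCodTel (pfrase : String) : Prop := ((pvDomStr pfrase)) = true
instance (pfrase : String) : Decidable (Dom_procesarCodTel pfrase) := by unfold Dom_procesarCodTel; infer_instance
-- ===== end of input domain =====

-- B replaces A's eight membership/.index list scans by pure arithmetic on the character's
-- ordinal (button and position computed from ord(c)-ord('a')), pieces joined once
-- (objective: alternative); return values proved equal on Dom.


-- ===== PORT A =====
-- literal transliteration of A: eight letter lists, a chain of membership tests with .index,
-- a string accumulator; strings handled as List Char (PySem convention)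
def procesarCodTel (pfrase : String) : String :=
  let n2 : List Char := ['a','b','c']
  let n3 : List Char := ['d','e','f']
  let n4 : List Char := ['g','h','i']
  let n5 : List Char := ['j','k','l']
  let n6 : List Char := ['m','n','o']
  let n7 : List Char := ['p','q','r','s']
  let n8 : List Char := ['t','u','v']
  let n9 : List Char := ['w','x','y','z']
  let resultado : List Char :=
    pfrase.toList.foldl (fun resultado letra =>
      let resultado :=
        if letra ∈ n2 then resultado ++ '2' :: PySem.Int.toChars (((PySem.List.index? n2 letra).getD 0 : Int) + 1)
        else if letra ∈ n3 then resultado ++ '3' :: PySem.Int.toChars (((PySem.List.index? n3 letra).getD 0 : Int) + 1)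
        else if letra ∈ n4 then resultado ++ '4' :: PySem.Int.toChars (((PySem.List.index? n4 letra).getD 0 : Int) + 1)
        else if letra ∈ n5 then resultado ++ '5' :: PySem.Int.toChars (((PySem.List.index? n5 letra).getD 0 : Int) + 1)
        else if letra ∈ n6 then resultado ++ '6' :: PySem.Int.toChars (((PySem.List.index? n6 letra).getD 0 : Int) + 1)
        else if letra ∈ n7 then resultado ++ '7' :: PySem.Int.toChars (((PySem.List.index? n7 letra).getD 0 : Int) + 1)
        else if letra ∈ n8 then resultado ++ '8' :: PySem.Int.toChars (((PySem.List.index? n8 letra).getD 0 : Int) + 1)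
        else if letra ∈ n9 then resultado ++ '9' :: PySem.Int.toChars (((PySem.List.index? n9 letra).getD 0 : Int) + 1)
        else resultado ++ ['*']
      resultado ++ [' ']) []
  String.ofList ("Mensaje codificado: ".toList ++ resultado)

-- ===== PORT B =====
-- B's per-character arithmetic: k = ord(letra) - ord('a'); the code is computed from k
-- by floor division / small offsets, no lists or table
def pvCode (letra : Char) : List Char :=
  let k : Int := (letra.toNat : Int) - 97
  if 0 ≤ k ∧ k < 15 then
    PySem.Int.toChars (2 + PySem.Int.floordiv k 3) ++ PySem.Int.toChars (PySem.Int.mod k 3 + 1) ++ [' ']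
  else if 15 ≤ k ∧ k < 19 then '7' :: PySem.Int.toChars (k - 14) ++ [' ']
  else if 19 ≤ k ∧ k < 22 then '8' :: PySem.Int.toChars (k - 18) ++ [' ']
  else if 22 ≤ k ∧ k < 26 then '9' :: PySem.Int.toChars (k - 21) ++ [' ']
  else ['*', ' ']

def procesarCodTel_alt (pfrase : String) : String :=
  let piezas : List (List Char) :=
    pfrase.toList.foldl (fun piezas letra => piezas ++ [pvCode letra]) ["Mensaje codificado: ".toList]
  String.ofList (PySem.Chars.join [] piezas)

-- ===== PRECONDITION & SPEC =====
def Spec_procesarCodTel (pfrase : String) (out : String) : Prop := out = procesarCodTel_alt pfrase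
instance (pfrase : String) (out : String) : Decidable (Spec_procesarCodTel pfrase out) := by unfold Spec_procesarCodTel; infer_instance

-- ===== CLAIM =====
def Claim_equal_procesarCodTel : Prop := ∀ (pfrase : String), Dom_procesarCodTel pfrase → Spec_procesarCodTel pfrase (procesarCodTel pfrase)

-- ===== LEMMAS AND PROOFS =====

-- the per-character code A's branch chain produces
def pvEncA (letra : Char) : List Char :=
  (if letra ∈ (['a','b','c'] : List Char) then '2' :: PySem.Int.toChars (((PySem.List.index? ['a','b','c'] letra).getD 0 : Int) + 1)
   else if letra ∈ (['d','e','f'] : List Char) then '3' :: PySem.Int.toChars (((PySem.List.index? ['d','e','f'] letra).getD 0 : Int) + 1)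
   else if letra ∈ (['g','h','i'] : List Char) then '4' :: PySem.Int.toChars (((PySem.List.index? ['g','h','i'] letra).getD 0 : Int) + 1)
   else if letra ∈ (['j','k','l'] : List Char) then '5' :: PySem.Int.toChars (((PySem.List.index? ['j','k','l'] letra).getD 0 : Int) + 1)
   else if letra ∈ (['m','n','o'] : List Char) then '6' :: PySem.Int.toChars (((PySem.List.index? ['m','n','o'] letra).getD 0 : Int) + 1)
   else if letra ∈ (['p','q','r','s'] : List Char) then '7' :: PySem.Int.toChars (((PySem.List.index? ['p','q','r','s'] letra).getD 0 : Int) + 1)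
   else if letra ∈ (['t','u','v'] : List Char) then '8' :: PySem.Int.toChars (((PySem.List.index? ['t','u','v'] letra).getD 0 : Int) + 1)
   else if letra ∈ (['w','x','y','z'] : List Char) then '9' :: PySem.Int.toChars (((PySem.List.index? ['w','x','y','z'] letra).getD 0 : Int) + 1)
   else ['*']) ++ [' ']

theorem pvFoldA_eq (l : List Char) (acc : List Char) :
    l.foldl (fun resultado letra =>
      (if letra ∈ (['a','b','c'] : List Char) then resultado ++ '2' :: PySem.Int.toChars (((PySem.List.index? ['a','b','c'] letra).getD 0 : Int) + 1)
       else if letra ∈ (['d','e','f'] : List Char) then resultado ++ '3' :: PySem.Int.toChars (((PySem.List.index? ['d','e','f'] letra).getD 0 : Int) + 1)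
       else if letra ∈ (['g','h','i'] : List Char) then resultado ++ '4' :: PySem.Int.toChars (((PySem.List.index? ['g','h','i'] letra).getD 0 : Int) + 1)
       else if letra ∈ (['j','k','l'] : List Char) then resultado ++ '5' :: PySem.Int.toChars (((PySem.List.index? ['j','k','l'] letra).getD 0 : Int) + 1)
       else if letra ∈ (['m','n','o'] : List Char) then resultado ++ '6' :: PySem.Int.toChars (((PySem.List.index? ['m','n','o'] letra).getD 0 : Int) + 1)
       else if letra ∈ (['p','q','r','s'] : List Char) then resultado ++ '7' :: PySem.Int.toChars (((PySem.List.index? ['p','q','r','s'] letra).getD 0 : Int) + 1)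
       else if letra ∈ (['t','u','v'] : List Char) then resultado ++ '8' :: PySem.Int.toChars (((PySem.List.index? ['t','u','v'] letra).getD 0 : Int) + 1)
       else if letra ∈ (['w','x','y','z'] : List Char) then resultado ++ '9' :: PySem.Int.toChars (((PySem.List.index? ['w','x','y','z'] letra).getD 0 : Int) + 1)
       else resultado ++ ['*']) ++ [' ']) acc
    = acc ++ l.flatMap pvEncA := by
  have h := PySem.List.foldl_append_eq_flatMap (g := pvEncA) (l := l) (acc := acc)
  rw [← h]
  apply PySem.List.foldl_congr_mem
  intro res letra _
  unfold pvEncA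
  split_ifs <;> simp

theorem pvJoinFlatten (parts : List (List Char)) : PySem.Chars.join [] parts = parts.flatten := by
  simp only [PySem.Chars.join, List.intercalate]
  induction parts with
  | nil => rfl
  | cons p t ih =>
    cases t with
    | nil => simp [List.intersperse]
    | cons q t' => simp_all [List.intersperse]

theorem pvEnc_eq (c : Char) : pvEncA c = pvCode c := by
  by_cases h : 97 ≤ c.toNat ∧ c.toNat ≤ 122
  · obtain ⟨hlo, hhi⟩ := h
    have h26 : c.toNat = 97 ∨ c.toNat = 98 ∨ c.toNat = 99 ∨ c.toNat = 100 ∨ c.toNat = 101 ∨ c.toNat = 102 ∨ c.toNat = 103 ∨ c.toNat = 104 ∨ c.toNat = 105 ∨ c.toNat = 106 ∨ c.toNat = 107 ∨ c.toNat = 108 ∨ c.toNat = 109 ∨ c.toNat = 110 ∨ c.toNat = 111 ∨ c.toNat = 112 ∨ c.toNat = 113 ∨ c.toNat = 114 ∨ c.toNat = 115 ∨ c.toNat = 116 ∨ c.toNat = 117 ∨ c.toNat = 118 ∨ c.toNat = 119 ∨ c.toNat = 120 ∨ c.toNat = 121 ∨ c.toNat = 122 := by omega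
    rcases h26 with h|h|h|h|h|h|h|h|h|h|h|h|h|h|h|h|h|h|h|h|h|h|h|h|h|h
    · have hc : c = 'a' := by
        apply Char.ext; apply UInt32.toNat_inj.mp
        show c.toNat = Char.toNat 'a'; rw [h]; rfl
      subst hc; decide
    · have hc : c = 'b' := by
        apply Char.ext; apply UInt32.toNat_inj.mp
        show c.toNat = Char.toNat 'b'; rw [h]; rfl
      subst hc; decide
    · have hc : c = 'c' := by
        apply Char.ext; apply UInt32.toNat_inj.mp
        show c.toNat = Char.toNat 'c'; rw [h]; rfl
      subst hc; decide
    · have hc : c = 'd' := by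
        apply Char.ext; apply UInt32.toNat_inj.mp
        show c.toNat = Char.toNat 'd'; rw [h]; rfl
      subst hc; decide
    · have hc : c = 'e' := by
        apply Char.ext; apply UInt32.toNat_inj.mp
        show c.toNat = Char.toNat 'e'; rw [h]; rfl
      subst hc; decide
    · have hc : c = 'f' := by
        apply Char.ext; apply UInt32.toNat_inj.mp
        show c.toNat = Char.toNat 'f'; rw [h]; rfl
      subst hc; decide
    · have hc : c = 'g' := by
        apply Char.ext; apply UInt32.toNat_inj.mp
        show c.toNat = Char.toNat 'g'; rw [h]; rfl
      subst hc; decide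
    · have hc : c = 'h' := by
        apply Char.ext; apply UInt32.toNat_inj.mp
        show c.toNat = Char.toNat 'h'; rw [h]; rfl
      subst hc; decide
    · have hc : c = 'i' := by
        apply Char.ext; apply UInt32.toNat_inj.mp
        show c.toNat = Char.toNat 'i'; rw [h]; rfl
      subst hc; decide
    · have hc : c = 'j' := by
        apply Char.ext; apply UInt32.toNat_inj.mp
        show c.toNat = Char.toNat 'j'; rw [h]; rfl
      subst hc; decide
    · have hc : c = 'k' := by
        apply Char.ext; apply UInt32.toNat_inj.mp
        show c.toNat = Char.toNat 'k'; rw [h]; rfl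
      subst hc; decide
    · have hc : c = 'l' := by
        apply Char.ext; apply UInt32.toNat_inj.mp
        show c.toNat = Char.toNat 'l'; rw [h]; rfl
      subst hc; decide
    · have hc : c = 'm' := by
        apply Char.ext; apply UInt32.toNat_inj.mp
        show c.toNat = Char.toNat 'm'; rw [h]; rfl
      subst hc; decide
    · have hc : c = 'n' := by
        apply Char.ext; apply UInt32.toNat_inj.mp
        show c.toNat = Char.toNat 'n'; rw [h]; rfl
      subst hc; decide
    · have hc : c = 'o' := by
        apply Char.ext; apply UInt32.toNat_inj.mp
        show c.toNat = Char.toNat 'o'; rw [h]; rfl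
      subst hc; decide
    · have hc : c = 'p' := by
        apply Char.ext; apply UInt32.toNat_inj.mp
        show c.toNat = Char.toNat 'p'; rw [h]; rfl
      subst hc; decide
    · have hc : c = 'q' := by
        apply Char.ext; apply UInt32.toNat_inj.mp
        show c.toNat = Char.toNat 'q'; rw [h]; rfl
      subst hc; decide
    · have hc : c = 'r' := by
        apply Char.ext; apply UInt32.toNat_inj.mp
        show c.toNat = Char.toNat 'r'; rw [h]; rfl
      subst hc; decide
    · have hc : c = 's' := by
        apply Char.ext; apply UInt32.toNat_inj.mp
        show c.toNat = Char.toNat 's'; rw [h]; rfl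
      subst hc; decide
    · have hc : c = 't' := by
        apply Char.ext; apply UInt32.toNat_inj.mp
        show c.toNat = Char.toNat 't'; rw [h]; rfl
      subst hc; decide
    · have hc : c = 'u' := by
        apply Char.ext; apply UInt32.toNat_inj.mp
        show c.toNat = Char.toNat 'u'; rw [h]; rfl
      subst hc; decide
    · have hc : c = 'v' := by
        apply Char.ext; apply UInt32.toNat_inj.mp
        show c.toNat = Char.toNat 'v'; rw [h]; rfl
      subst hc; decide
    · have hc : c = 'w' := by
        apply Char.ext; apply UInt32.toNat_inj.mp
        show c.toNat = Char.toNat 'w'; rw [h]; rfl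
      subst hc; decide
    · have hc : c = 'x' := by
        apply Char.ext; apply UInt32.toNat_inj.mp
        show c.toNat = Char.toNat 'x'; rw [h]; rfl
      subst hc; decide
    · have hc : c = 'y' := by
        apply Char.ext; apply UInt32.toNat_inj.mp
        show c.toNat = Char.toNat 'y'; rw [h]; rfl
      subst hc; decide
    · have hc : c = 'z' := by
        apply Char.ext; apply UInt32.toNat_inj.mp
        show c.toNat = Char.toNat 'z'; rw [h]; rfl
      subst hc; decide
  · have ne1 : c ≠ 'a' := fun he => h (by rw [he]; decide)
    have ne2 : c ≠ 'b' := fun he => h (by rw [he]; decide)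
    have ne3 : c ≠ 'c' := fun he => h (by rw [he]; decide)
    have ne4 : c ≠ 'd' := fun he => h (by rw [he]; decide)
    have ne5 : c ≠ 'e' := fun he => h (by rw [he]; decide)
    have ne6 : c ≠ 'f' := fun he => h (by rw [he]; decide)
    have ne7 : c ≠ 'g' := fun he => h (by rw [he]; decide)
    have ne8 : c ≠ 'h' := fun he => h (by rw [he]; decide)
    have ne9 : c ≠ 'i' := fun he => h (by rw [he]; decide)
    have ne10 : c ≠ 'j' := fun he => h (by rw [he]; decide)
    have ne11 : c ≠ 'k' := fun he => h (by rw [he]; decide)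
    have ne12 : c ≠ 'l' := fun he => h (by rw [he]; decide)
    have ne13 : c ≠ 'm' := fun he => h (by rw [he]; decide)
    have ne14 : c ≠ 'n' := fun he => h (by rw [he]; decide)
    have ne15 : c ≠ 'o' := fun he => h (by rw [he]; decide)
    have ne16 : c ≠ 'p' := fun he => h (by rw [he]; decide)
    have ne17 : c ≠ 'q' := fun he => h (by rw [he]; decide)
    have ne18 : c ≠ 'r' := fun he => h (by rw [he]; decide)
    have ne19 : c ≠ 's' := fun he => h (by rw [he]; decide)
    have ne20 : c ≠ 't' := fun he => h (by rw [he]; decide)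
    have ne21 : c ≠ 'u' := fun he => h (by rw [he]; decide)
    have ne22 : c ≠ 'v' := fun he => h (by rw [he]; decide)
    have ne23 : c ≠ 'w' := fun he => h (by rw [he]; decide)
    have ne24 : c ≠ 'x' := fun he => h (by rw [he]; decide)
    have ne25 : c ≠ 'y' := fun he => h (by rw [he]; decide)
    have ne26 : c ≠ 'z' := fun he => h (by rw [he]; decide)
    unfold pvEncA pvCode
    simp only [List.mem_cons, List.not_mem_nil, or_false]
    rw [if_neg, if_neg, if_neg, if_neg, if_neg, if_neg, if_neg, if_neg,
        if_neg (by omega), if_neg (by omega), if_neg (by omega), if_neg (by omega)]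
    all_goals simp [ne1, ne2, ne3, ne4, ne5, ne6, ne7, ne8, ne9, ne10, ne11, ne12, ne13, ne14, ne15, ne16, ne17, ne18, ne19, ne20, ne21, ne22, ne23, ne24, ne25, ne26]

-- ===== VERDICT =====
theorem procesarCodTel_spec : Claim_equal_procesarCodTel := by
  intro pfrase _
  unfold Spec_procesarCodTel procesarCodTel procesarCodTel_alt
  simp only [pvFoldA_eq, PySem.List.foldl_append_singleton_eq_map, pvJoinFlatten,
    List.flatMap, List.nil_append]
  congr 2
  exact congrArg List.flatten (List.map_congr_left (fun c _ => pvEnc_eq c))
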